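-- pv_equiv track=rewrite | github.com/stepin104483/Log-Analysis-tool | Band_Combos_Analyzer/src/parsers/mcfg_parser.py | decode_band_bitmask
-- ===== SOURCE A (Python) =====
-- from typing import Dict, Set, Optional, List
--
-- def decode_band_bitmask(nv_bytes: List[int], start_band: int = 1) -> Set[int]:
--     """
--     Decode NV band preference bitmask to extract enabled bands.
--
--     Each byte contains 8 bits, each bit representing a band's enable status.
--     Bit 0 of byte 0 = Band (start_band)
--     Bit 7 of byte 0 = Band (start_band + 7)
--     Bit 0 of byte 1 = Band (start_band + 8)
--     etc.
--
--     Args: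
--         nv_bytes: List of byte values from NV item
--         start_band: Starting band number (1 for NV65633, 65 for NV73680)
--
--     Returns:
--         Set of enabled band numbers (1-indexed)
--     """
--     enabled_bands: Set[int] = set()
--
--     for byte_idx, byte_val in enumerate(nv_bytes):
--         for bit_pos in range(8):
--             if byte_val & (1 << bit_pos):  # Check if bit is set
--                 band_num = start_band + (byte_idx * 8) + bit_pos
--                 enabled_bands.add(band_num)
--
--     return enabled_bands
-- ===== SOURCE B (Python) =====
-- def decode_band_bitmask(nv_bytes, start_band=1):
--     enabled_bands = set()
--     base = start_band
--     for byte_val in nv_bytes: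
--         b = byte_val & 0xFF  # low 8 bits only, also for negative ints
--         while b:             # visit only the set bits, lowest first
--             low = b & -b
--             enabled_bands.add(base + low.bit_length() - 1)
--             b &= b - 1
--         base += 8
--     return enabled_bands
-- ===== Notes on version B (the rewrite author's own statement) =====
-- stated objective: alternative
-- what changed: Per byte, B extracts only the set bits of byte & 0xFF with lowest-bit isolation (b & -b, bit_length, b &= b-1) instead of testing all 8 positions with range(8), and carries the band base as a running accumulator instead of enumerate's index arithmetic.
import Mathlib
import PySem

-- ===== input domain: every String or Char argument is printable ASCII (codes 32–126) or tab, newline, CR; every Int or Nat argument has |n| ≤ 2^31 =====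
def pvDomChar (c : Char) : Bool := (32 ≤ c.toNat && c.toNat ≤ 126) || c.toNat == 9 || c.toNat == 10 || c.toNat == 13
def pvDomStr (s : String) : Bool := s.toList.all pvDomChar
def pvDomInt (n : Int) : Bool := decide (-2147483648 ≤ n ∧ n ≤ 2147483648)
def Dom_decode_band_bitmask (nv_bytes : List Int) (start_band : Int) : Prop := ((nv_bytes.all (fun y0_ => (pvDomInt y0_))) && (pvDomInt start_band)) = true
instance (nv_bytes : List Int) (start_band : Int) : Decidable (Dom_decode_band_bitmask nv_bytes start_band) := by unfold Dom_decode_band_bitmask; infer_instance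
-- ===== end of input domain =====

-- B replaces the fixed 8-bit scan per byte by extracting only the set bits of byte & 0xFF
-- (lowest-bit isolation b & -b, cleared with b &= b-1) while carrying the band base as an
-- accumulator instead of enumerate; objective: alternative (same cost, different traversal).


-- ===== PORT A =====
-- for byte_idx, byte_val in enumerate(nv_bytes): for bit_pos in range(8):
--   if byte_val & (1 << bit_pos): enabled_bands.add(start_band + byte_idx*8 + bit_pos)
-- bit_pos ∈ 0..7 is nonnegative, so `.toNat` on the shift amount is exact.
def decode_band_bitmask (nv_bytes : List Int) (start_band : Int) : List Int :=
  (PySem.List.enumerate nv_bytes 0).foldl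
    (fun enabled_bands p =>
      (PySem.List.pyRange 0 8 1).foldl
        (fun enabled_bands bit_pos =>
          if PySem.Int.band p.2 ((1 : Int) <<< bit_pos.toNat) ≠ 0 then
            PySem.Set.add enabled_bands (start_band + p.1 * 8 + bit_pos)
          else enabled_bands)
        enabled_bands)
    (PySem.Set.empty)

-- ===== PORT B =====
-- while b: low = b & -b; add(base + low.bit_length() - 1); b &= b - 1
-- Here b = byte & 0xFF is always ≥ 0, so Python's `while b:` test (b ≠ 0) is exactly `¬ b ≤ 0`;
-- the ≤ form only makes the recursion total on the unreachable negative arguments.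
def pvExtract (base : Int) (b : Int) (s : PySem.Set Int) : PySem.Set Int :=
  if h : b ≤ 0 then s
  else
    pvExtract base (PySem.Int.band b (b - 1))
      (PySem.Set.add s (base + (PySem.Int.bitLength (PySem.Int.band b (-b)) : Int) - 1))
termination_by b.toNat
decreasing_by
  have h1 : PySem.Int.band b (b - 1) = ((b.toNat &&& (b - 1).toNat : Nat) : Int) :=
    PySem.Int.band_of_nonneg (by omega) (by omega)
  have h2 : (b.toNat &&& (b - 1).toNat) ≤ (b - 1).toNat := Nat.and_le_right
  omega

def decode_band_bitmask_alt (nv_bytes : List Int) (start_band : Int) : List Int :=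
  (nv_bytes.foldl
    (fun st byte_val => (pvExtract st.2 (PySem.Int.band byte_val 255) st.1, st.2 + 8))
    ((PySem.Set.empty : PySem.Set Int), start_band)).1

-- ===== PRECONDITION & SPEC =====
def Spec_decode_band_bitmask (nv_bytes : List Int) (start_band : Int) (out : List Int) : Prop := out = decode_band_bitmask_alt nv_bytes start_band
instance (nv_bytes : List Int) (start_band : Int) (out : List Int) : Decidable (Spec_decode_band_bitmask nv_bytes start_band out) := by unfold Spec_decode_band_bitmask; infer_instance

-- ===== CLAIM (what is proved, stated in full; the proofs are below) =====
def Claim_equal_decode_band_bitmask : Prop := ∀ (nv_bytes : List Int) (start_band : Int), Dom_decode_band_bitmask nv_bytes start_band → Spec_decode_band_bitmask nv_bytes start_band (decode_band_bitmask nv_bytes start_band)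

-- ===== LEMMAS AND PROOFS =====

-- positions of the set bits among the low 8 bits, ascending (the order A visits them)
def posA (n : Nat) : List Nat := (List.range 8).filter (fun p => n.testBit p)

lemma band255_bounds (byte : Int) :
    0 ≤ PySem.Int.band byte 255 ∧ PySem.Int.band byte 255 < 256 := by
  unfold PySem.Int.band
  split_ifs with h1 h2 h2
  · have : byte.toNat &&& (255 : Int).toNat ≤ (255 : Int).toNat := Nat.and_le_right
    omega
  · omega
  · have : (255 : Int).toNat - ((255 : Int).toNat &&& (-byte - 1).toNat) ≤ (255 : Int).toNat :=
      Nat.sub_le _ _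
    omega
  · omega

lemma testBit255 : ∀ p : Fin 8, Nat.testBit 255 p.val = true := by decide

set_option maxRecDepth 8192 in
lemma testBit_sub255 : ∀ r : Fin 256, ∀ p : Fin 8,
    Nat.testBit (255 - r.val) p.val = !(Nat.testBit r.val p.val) := by decide

lemma bridge (byte : Int) (p : Nat) (hp : p < 8) :
    (PySem.Int.band byte ((1 : Int) <<< (p : Int)) ≠ 0) ↔
      Nat.testBit (PySem.Int.band byte 255).toNat p = true := by
  have hsh : ((1 : Int) <<< (p : Int)) = ((2 ^ p : Nat) : Int) := Int.one_shiftLeft p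
  rcases le_or_gt 0 byte with hb | hb
  · have h255 : PySem.Int.band byte 255 = ((byte.toNat &&& 255 : Nat) : Int) :=
      PySem.Int.band_of_nonneg hb (by norm_num)
    have hpw : PySem.Int.band byte ((2 ^ p : Nat) : Int) = ((byte.toNat &&& 2 ^ p : Nat) : Int) :=
      PySem.Int.band_of_nonneg hb (by positivity)
    rw [hsh, hpw, h255, Int.toNat_natCast, Nat.testBit_and, testBit255 ⟨p, hp⟩]
    rw [Nat.and_two_pow]
    have hpow : (0 : Nat) < 2 ^ p := Nat.two_pow_pos p
    cases hbit : byte.toNat.testBit p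
    · simp
    · simp only [Bool.toNat_true, one_mul]
      constructor
      · intro _; rfl
      · intro _; exact_mod_cast hpow.ne'
  · -- negative byte: band a b = b.toNat - (b.toNat &&& (-a-1).toNat)
    set k : Nat := (-byte - 1).toNat with hk
    have hbandpw : PySem.Int.band byte ((2 ^ p : Nat) : Int) = ((2 ^ p - (2 ^ p &&& k) : Nat) : Int) := by
      unfold PySem.Int.band
      rw [if_neg (by omega), if_pos (by positivity)]
      rw [Int.toNat_natCast, ← hk]
    have hband255 : PySem.Int.band byte 255 = ((255 - (255 &&& k) : Nat) : Int) := by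
      unfold PySem.Int.band
      rw [if_neg (by omega), if_pos (by norm_num)]
      have h255 : (255 : Int).toNat = 255 := rfl
      rw [h255, ← hk]
    have hr : (255 &&& k) ≤ 255 := Nat.and_le_left
    have hrbit : Nat.testBit (255 &&& k) p = Nat.testBit k p := by
      rw [Nat.testBit_and, testBit255 ⟨p, hp⟩, Bool.true_and]
    rw [hsh, hbandpw, hband255, Int.toNat_natCast]
    have hD := testBit_sub255 ⟨255 &&& k, by omega⟩ ⟨p, hp⟩
    simp only at hD
    rw [hD, hrbit, Nat.two_pow_and]
    have hpow : (0 : Nat) < 2 ^ p := Nat.two_pow_pos p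
    cases hbit : k.testBit p
    · simp only [Bool.toNat_false, Nat.mul_zero, Nat.sub_zero, Bool.not_false]
      constructor <;> intro _ <;> first | trivial | exact_mod_cast hpow.ne'
    · simp

lemma toNat_ofNat_self (p : Nat) : ((p : Int)).toNat = p := Int.toNat_natCast p

lemma foldA_eq (byte base : Int) :
    ∀ (ps : List Nat) (s : PySem.Set Int), (∀ p ∈ ps, p < 8) →
      (ps.map (fun (i : Nat) => (i : Int))).foldl (fun s2 bit_pos =>
          if PySem.Int.band byte ((1 : Int) <<< bit_pos.toNat) ≠ 0 then
            PySem.Set.add s2 (base + bit_pos)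
          else s2) s
        = (ps.filter (fun p => Nat.testBit (PySem.Int.band byte 255).toNat p)).foldl
            (fun (s2 : PySem.Set Int) (p : Nat) => PySem.Set.add s2 (base + (p : Int))) s := by
  intro ps
  induction ps with
  | nil => intro s _; rfl
  | cons p ps ih =>
    intro s hmem
    have hp : p < 8 := hmem p (by simp)
    have hcond := bridge byte p hp
    have htail : ∀ q ∈ ps, q < 8 := fun q hq => hmem q (by simp [hq])
    by_cases hb : Nat.testBit (PySem.Int.band byte 255).toNat p = true
    · simp only [List.map_cons, List.foldl_cons, List.filter_cons, hb, ite_true,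
        toNat_ofNat_self, if_pos (hcond.mpr hb)]
      exact ih _ htail
    · have hb' : ¬ PySem.Int.band byte ((1 : Int) <<< (p : Int)) ≠ 0 := fun h => hb (hcond.mp h)
      simp only [List.map_cons, List.foldl_cons, List.filter_cons, toNat_ofNat_self,
        if_neg hb', hb, Bool.false_eq_true, ite_false]
      exact ih _ htail

-- the head step of B's bit-extraction loop, decided over all 256 byte values
set_option maxRecDepth 8192 in
lemma posA_step : ∀ m : Fin 256, m.val ≠ 0 →
    posA m.val
      = (PySem.Int.bitLength ((m.val - (m.val &&& (m.val - 1)) : Nat) : Int) - 1)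
          :: posA (m.val &&& (m.val - 1))
    ∧ 1 ≤ PySem.Int.bitLength ((m.val - (m.val &&& (m.val - 1)) : Nat) : Int) := by decide

lemma band_neg_self (m : Nat) (hm : 0 < m) :
    PySem.Int.band (m : Int) (-(m : Int)) = ((m - (m &&& (m - 1)) : Nat) : Int) := by
  unfold PySem.Int.band
  rw [if_pos (by positivity), if_neg (by omega)]
  have h1 : (-(-(m : Int)) - 1).toNat = m - 1 := by omega
  rw [h1, Int.toNat_natCast]

lemma band_pred (m : Nat) (hm : 0 < m) :
    PySem.Int.band (m : Int) ((m : Int) - 1) = ((m &&& (m - 1) : Nat) : Int) := by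
  have h1 : ((m : Int) - 1) = ((m - 1 : Nat) : Int) := by omega
  rw [h1, PySem.Int.band_natCast]

lemma pvExtract_eq : ∀ (m : Nat), m < 256 → ∀ (base : Int) (s : PySem.Set Int),
    pvExtract base (m : Int) s
      = (posA m).foldl (fun (s2 : PySem.Set Int) (p : Nat) => PySem.Set.add s2 (base + (p : Int))) s := by
  intro m
  induction m using Nat.strong_induction_on with
  | _ m ih =>
    intro hm base s
    by_cases h0 : m = 0
    · subst h0
      rw [pvExtract]
      simp [posA]
    · have hpos : 0 < m := Nat.pos_of_ne_zero h0
      rw [pvExtract, dif_neg (by omega)]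
      rw [band_neg_self m hpos, band_pred m hpos]
      obtain ⟨hstep, hbl⟩ := posA_step ⟨m, hm⟩ h0
      simp only at hstep hbl
      rw [hstep, List.foldl_cons]
      have hlt : (m &&& (m - 1)) < m :=
        lt_of_le_of_lt (Nat.and_le_right) (by omega)
      rw [ih _ hlt (by omega) base]
      congr 2
      omega

lemma pyRange8 : PySem.List.pyRange 0 8 1 = (List.range 8).map (fun (i : Nat) => (i : Int)) := by decide

lemma perByte (byte base : Int) (s : PySem.Set Int) :
    (PySem.List.pyRange 0 8 1).foldl
        (fun s2 bit_pos =>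
          if PySem.Int.band byte ((1 : Int) <<< bit_pos.toNat) ≠ 0 then
            PySem.Set.add s2 (base + bit_pos)
          else s2) s
      = pvExtract base (PySem.Int.band byte 255) s := by
  obtain ⟨hge, hlt⟩ := band255_bounds byte
  set n : Nat := (PySem.Int.band byte 255).toNat with hn
  have hcast : PySem.Int.band byte 255 = (n : Int) := by omega
  rw [hcast, pvExtract_eq n (by omega) base, pyRange8,
    foldA_eq byte base (List.range 8) s (fun p hp => List.mem_range.mp hp), ← hn]
  rfl

lemma outer_eq (start_band : Int) : ∀ (bs : List Int) (j : Int) (s : PySem.Set Int),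
    (PySem.List.enumerate bs j).foldl
        (fun enabled_bands p =>
          (PySem.List.pyRange 0 8 1).foldl
            (fun enabled_bands bit_pos =>
              if PySem.Int.band p.2 ((1 : Int) <<< bit_pos.toNat) ≠ 0 then
                PySem.Set.add enabled_bands (start_band + p.1 * 8 + bit_pos)
              else enabled_bands)
            enabled_bands) s
      = (bs.foldl
          (fun st byte_val => (pvExtract st.2 (PySem.Int.band byte_val 255) st.1, st.2 + 8))
          (s, start_band + 8 * j)).1 := by
  intro bs
  induction bs with
  | nil => intro j s; simp [PySem.List.enumerate_nil]
  | cons b bs ih =>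
    intro j s
    rw [PySem.List.enumerate_cons, List.foldl_cons, List.foldl_cons]
    have hb : start_band + 8 * j = start_band + j * 8 := by ring
    rw [perByte b (start_band + j * 8) s, ih (j + 1)]
    have h8 : start_band + 8 * (j + 1) = start_band + j * 8 + 8 := by ring
    rw [h8, hb]

-- ===== VERDICT (by name: the statement is the Claim_ definition above) =====
theorem decode_band_bitmask_spec : Claim_equal_decode_band_bitmask := by
  intro nv_bytes start_band _
  unfold Spec_decode_band_bitmask decode_band_bitmask decode_band_bitmask_alt
  have h := outer_eq start_band nv_bytes 0 (PySem.Set.empty)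
  simpa using h
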